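-- pv_equiv track=rewrite | github.com/rehaansekap/PramLearn-Platform | backendpramlearn/pramlearnapp/views/teacher/sessions/teacherSessionAutoGroupFormationView.py | create_uniformity_first_solution
-- ===== SOURCE A (Python) =====
-- def create_uniformity_first_solution(students, n_groups, target_sizes):
--     """
--     Create solution prioritizing uniformity
--     """
--     # Group by motivation level
--     motivation_indices = {"High": [], "Medium": [], "Low": []}
--
--     for i, student in enumerate(students):
--         level = student["motivation_level"]
--         if level in motivation_indices:
--             motivation_indices[level].append(i)
--
--     solution = [0] * len(students)
--
--     # Distribute each level evenly
--     for level, indices in motivation_indices.items():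
--         for i, student_idx in enumerate(indices):
--             group_idx = i % n_groups
--             solution[student_idx] = group_idx
--
--     return solution
-- ===== SOURCE B (Python) =====
-- def create_uniformity_first_solution(students, n_groups, target_sizes):
--     """
--     Create solution prioritizing uniformity (single pass with per-level counters)
--     """
--     counters = {"High": 0, "Medium": 0, "Low": 0}
--     solution = []
--     for student in students:
--         level = student["motivation_level"]
--         if level in counters:
--             solution.append(counters[level] % n_groups)
--             counters[level] += 1
--         else:
--             solution.append(0)
--     return solution
-- ===== Notes on version B (the rewrite author's own statement) =====
-- stated objective: simpler
-- what changed: Replaces A's two-phase algorithm (build per-level index lists, then scatter-write i % n_groups into a preallocated zero list) with a single linear pass that keeps one counter per motivation level and appends each student's group number directly.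
import Mathlib
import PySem

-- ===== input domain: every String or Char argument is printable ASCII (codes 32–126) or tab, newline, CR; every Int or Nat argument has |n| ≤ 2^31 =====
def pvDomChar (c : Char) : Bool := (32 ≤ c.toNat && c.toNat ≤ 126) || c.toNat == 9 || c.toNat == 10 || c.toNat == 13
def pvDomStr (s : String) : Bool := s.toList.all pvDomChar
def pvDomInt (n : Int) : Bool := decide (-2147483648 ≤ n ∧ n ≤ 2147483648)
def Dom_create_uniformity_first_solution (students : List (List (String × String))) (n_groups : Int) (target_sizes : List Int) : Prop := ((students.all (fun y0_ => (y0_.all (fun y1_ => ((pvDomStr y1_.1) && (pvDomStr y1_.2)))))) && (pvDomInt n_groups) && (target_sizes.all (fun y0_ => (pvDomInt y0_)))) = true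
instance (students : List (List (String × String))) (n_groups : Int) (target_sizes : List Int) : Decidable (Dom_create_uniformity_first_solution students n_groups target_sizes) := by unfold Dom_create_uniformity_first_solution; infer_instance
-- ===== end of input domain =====

-- B replaces A's two-phase algorithm (collect per-level index lists, then scatter-write i % n_groups
-- into a preallocated zero list) by a single pass with one counter per level, appending each group
-- number directly; objective: simpler. Neither implementation mutates its arguments.

-- ===== PORT A =====
-- student["motivation_level"] is ported as get? … .getD "" — total form; Pre_ excludes the KeyError
-- inputs (a student without that key). pySetD is the total form of solution[idx] = v (idx is an
-- enumerate index, always in range). PySem.Int.mod is Python's %; Pre_ excludes its ZeroDivisionError.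
def create_uniformity_first_solution (students : List (List (String × String))) (n_groups : Int) (target_sizes : List Int) : List Int :=
  let mi0 : PySem.Dict String (List Int) := PySem.Dict.ofList [("High", []), ("Medium", []), ("Low", [])]
  let mi := (PySem.List.enumerate students 0).foldl (fun d p =>
      let level := ((PySem.Dict.mk p.2).get? "motivation_level").getD ""
      if d.contains level then d.modify level [] (· ++ [p.1]) else d) mi0
  let solution : List Int := List.replicate students.length 0
  mi.items.foldl (fun sol q =>
    (PySem.List.enumerate q.2 0).foldl (fun sol r =>
      let group_idx := PySem.Int.mod r.1 n_groups
      PySem.List.pySetD sol r.2 group_idx) sol) solution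

-- ===== PORT B =====
-- single pass: counters dict + appended solution ('level in counters' = get? isSome, matched directly);
-- the loop body is the helper pvBStep
def pvBStep (n_groups : Int) (acc : PySem.Dict String Int × List Int) (student : List (String × String)) : PySem.Dict String Int × List Int :=
  let level := ((PySem.Dict.mk student).get? "motivation_level").getD ""
  match acc.1.get? level with
  | some c => (acc.1.insert level (c + 1), acc.2 ++ [PySem.Int.mod c n_groups])
  | none => (acc.1, acc.2 ++ [0])

def create_uniformity_first_solution_alt (students : List (List (String × String))) (n_groups : Int) (target_sizes : List Int) : List Int :=
  let init : PySem.Dict String Int × List Int := (PySem.Dict.ofList [("High", 0), ("Medium", 0), ("Low", 0)], [])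
  (students.foldl (pvBStep n_groups) init).2

-- ===== PRECONDITION & SPEC =====
-- Pre_ excludes exactly the inputs where the Python A raises: a KeyError (some student dict lacks the
-- key "motivation_level") or a ZeroDivisionError (n_groups = 0 while some student has one of the three
-- known motivation levels, so 'i % n_groups' is reached).
def Pre_create_uniformity_first_solution (students : List (List (String × String))) (n_groups : Int) (target_sizes : List Int) : Prop :=
  (∀ s ∈ students, ((PySem.Dict.mk s).get? "motivation_level").isSome = true) ∧
  (n_groups ≠ 0 ∨ ∀ s ∈ students,
    ((PySem.Dict.mk s).get? "motivation_level").getD "" ≠ "High" ∧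
    ((PySem.Dict.mk s).get? "motivation_level").getD "" ≠ "Medium" ∧
    ((PySem.Dict.mk s).get? "motivation_level").getD "" ≠ "Low")
instance (students : List (List (String × String))) (n_groups : Int) (target_sizes : List Int) : Decidable (Pre_create_uniformity_first_solution students n_groups target_sizes) := by unfold Pre_create_uniformity_first_solution; infer_instance

def pvWitness_create_uniformity_first_solution : (List (List (String × String))) × Int × List Int :=
  ([[("motivation_level", "High")], [("motivation_level", "Low")], [("motivation_level", "High")]], 2, [2, 1])

def Spec_create_uniformity_first_solution (students : List (List (String × String))) (n_groups : Int) (target_sizes : List Int) (out : List Int) : Prop := out = create_uniformity_first_solution_alt students n_groups target_sizes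
instance (students : List (List (String × String))) (n_groups : Int) (target_sizes : List Int) (out : List Int) : Decidable (Spec_create_uniformity_first_solution students n_groups target_sizes out) := by unfold Spec_create_uniformity_first_solution; infer_instance

-- ===== CLAIM (what is proved, stated in full; the proofs are below) =====
def Claim_equal_create_uniformity_first_solution : Prop := ∀ (students : List (List (String × String))) (n_groups : Int) (target_sizes : List Int), Dom_create_uniformity_first_solution students n_groups target_sizes → Pre_create_uniformity_first_solution students n_groups target_sizes → Spec_create_uniformity_first_solution students n_groups target_sizes (create_uniformity_first_solution students n_groups target_sizes)

-- ===== LEMMAS AND PROOFS =====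

-- the motivation level of a student record, as both ports read it
def pvLvl (s : List (String × String)) : String := ((PySem.Dict.mk s).get? "motivation_level").getD ""

-- how many students in ss have level L
def pvCnt (ss : List (List (String × String))) (L : String) : Int := (ss.countP (fun s => pvLvl s == L) : Int)

-- the value both implementations produce for student s coming after prefix ss
def pvE (s : List (String × String)) (ss : List (List (String × String))) (n : Int) : Int :=
  if pvLvl s = "High" ∨ pvLvl s = "Medium" ∨ pvLvl s = "Low" then PySem.Int.mod (pvCnt ss (pvLvl s)) n else 0

-- the index list A's first phase collects for level L, starting at index k
def pvIdxs (ss : List (List (String × String))) (k : Int) (L : String) : List Int :=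
  match ss with
  | [] => []
  | s :: t => (if pvLvl s = L then [k] else []) ++ pvIdxs t (k + 1) L

-- A's second-phase inner write loop, start counter k
def pvW (n : Int) (I : List Int) (k : Int) (sol : List Int) : List Int :=
  match I with
  | [] => sol
  | i :: t => pvW n t (k + 1) (PySem.List.pySetD sol i (PySem.Int.mod k n))

theorem pvW_eq_foldl (n : Int) (I : List Int) (k : Int) (sol : List Int) :
    (PySem.List.enumerate I k).foldl (fun sol r =>
      PySem.List.pySetD sol r.2 (PySem.Int.mod r.1 n)) sol = pvW n I k sol := by
  induction I generalizing k sol with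
  | nil => rfl
  | cons i t ih => simp [PySem.List.enumerate_cons, pvW, ih]

theorem length_pvW (n : Int) (I : List Int) (k : Int) (sol : List Int) :
    (pvW n I k sol).length = sol.length := by
  induction I generalizing k sol with
  | nil => rfl
  | cons i t ih => simp [pvW, ih, PySem.List.length_pySetD]

theorem pySetD_append_left (sol : List Int) (v x : Int) (i : Int) (h0 : 0 ≤ i) (h1 : i < (sol.length : Int)) :
    PySem.List.pySetD (sol ++ [v]) i x = PySem.List.pySetD sol i x ++ [v] := by
  rw [PySem.List.pySetD_of_nonneg _ _ h0, PySem.List.pySetD_of_nonneg _ _ h0]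
  exact List.set_append_left i.toNat x (by omega)

theorem pvW_append_right (n : Int) (I : List Int) (k : Int) (sol : List Int) (v : Int)
    (h : ∀ i ∈ I, 0 ≤ i ∧ i < (sol.length : Int)) :
    pvW n I k (sol ++ [v]) = pvW n I k sol ++ [v] := by
  induction I generalizing k sol with
  | nil => rfl
  | cons i t ih =>
    have hi := h i (by simp)
    simp only [pvW, pySetD_append_left sol v _ i hi.1 hi.2]
    exact ih _ _ (by intro j hj; simpa [PySem.List.length_pySetD] using h j (by simp [hj]))

theorem pvW_snoc (n : Int) (I : List Int) (j k : Int) (sol : List Int) :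
    pvW n (I ++ [j]) k sol = PySem.List.pySetD (pvW n I k sol) j (PySem.Int.mod (k + I.length) n) := by
  induction I generalizing k sol with
  | nil => simp [pvW]
  | cons i t ih => simp [pvW, ih]; ring_nf

theorem pySetD_last (sol : List Int) (v0 v : Int) :
    PySem.List.pySetD (sol ++ [v0]) (sol.length : Int) v = sol ++ [v] := by
  rw [PySem.List.pySetD_of_nonneg _ _ (by positivity)]
  simp only [Int.toNat_natCast]
  rw [List.set_append_right _ _ (le_refl _)]
  simp

theorem pvIdxs_lt (ss : List (List (String × String))) (k : Int) (L : String) :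
    ∀ i ∈ pvIdxs ss k L, k ≤ i ∧ i < k + (ss.length : Int) := by
  induction ss generalizing k with
  | nil => simp [pvIdxs]
  | cons s t ih =>
    intro i hi
    simp only [pvIdxs, List.mem_append] at hi
    rcases hi with hi | hi
    · split at hi <;> simp_all
    · have := ih (k + 1) i hi; simp; omega

theorem pvIdxs_snoc (ss : List (List (String × String))) (s : List (String × String)) (k : Int) (L : String) :
    pvIdxs (ss ++ [s]) k L = pvIdxs ss k L ++ (if pvLvl s = L then [k + (ss.length : Int)] else []) := by
  induction ss generalizing k with
  | nil => simp [pvIdxs]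
  | cons a t ih =>
    simp only [List.cons_append, pvIdxs, ih, List.append_assoc, List.length_cons]
    rw [show ((↑(t.length + 1) : Int)) = 1 + (t.length : Int) by push_cast; ring,
      show k + (1 + (t.length : Int)) = k + 1 + (t.length : Int) by ring]

theorem length_pvIdxs (ss : List (List (String × String))) (k : Int) (L : String) :
    ((pvIdxs ss k L).length : Int) = pvCnt ss L := by
  induction ss generalizing k with
  | nil => simp [pvIdxs, pvCnt]
  | cons s t ih =>
    simp only [pvIdxs, pvCnt, List.countP_cons, List.length_append] at ih ⊢
    by_cases hsl : pvLvl s = L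
    · simp [hsl, ← ih (k + 1)]; omega
    · simp [hsl, ← ih (k + 1)]

theorem astep_eval (h m l : List Int) (k : Int) (s : List (String × String)) :
    (fun (d : PySem.Dict String (List Int)) (p : Int × List (String × String)) =>
      let level := ((PySem.Dict.mk p.2).get? "motivation_level").getD ""
      if d.contains level then d.modify level [] (· ++ [p.1]) else d)
      (PySem.Dict.mk [("High", h), ("Medium", m), ("Low", l)]) (k, s)
    = PySem.Dict.mk [("High", h ++ (if pvLvl s = "High" then [k] else [])),
        ("Medium", m ++ (if pvLvl s = "Medium" then [k] else [])),
        ("Low", l ++ (if pvLvl s = "Low" then [k] else []))] := by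
  show (if (PySem.Dict.mk [("High", h), ("Medium", m), ("Low", l)]).contains (pvLvl s) = true
      then (PySem.Dict.mk [("High", h), ("Medium", m), ("Low", l)]).modify (pvLvl s) [] (· ++ [k])
      else PySem.Dict.mk [("High", h), ("Medium", m), ("Low", l)]) = _
  by_cases hH : pvLvl s = "High"
  · simp [hH, PySem.Dict.contains, PySem.Dict.modify, PySem.Dict.insert, PySem.Dict.getD, PySem.Dict.get?]
  · by_cases hM : pvLvl s = "Medium"
    · simp [hM, PySem.Dict.contains, PySem.Dict.modify, PySem.Dict.insert, PySem.Dict.getD, PySem.Dict.get?]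
    · by_cases hL : pvLvl s = "Low"
      · simp [hL, PySem.Dict.contains, PySem.Dict.modify, PySem.Dict.insert, PySem.Dict.getD, PySem.Dict.get?]
      · simp [Ne.symm hH, Ne.symm hM, Ne.symm hL, PySem.Dict.contains, hH, hM, hL]

theorem mi_char (ss : List (List (String × String))) (k : Int) (h m l : List Int) :
    (PySem.List.enumerate ss k).foldl (fun d p =>
      let level := ((PySem.Dict.mk p.2).get? "motivation_level").getD ""
      if d.contains level then d.modify level [] (· ++ [p.1]) else d)
      (PySem.Dict.mk [("High", h), ("Medium", m), ("Low", l)])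
    = PySem.Dict.mk [("High", h ++ pvIdxs ss k "High"), ("Medium", m ++ pvIdxs ss k "Medium"),
        ("Low", l ++ pvIdxs ss k "Low")] := by
  induction ss generalizing k h m l with
  | nil => simp [pvIdxs, PySem.List.enumerate_nil]
  | cons s t ih =>
    rw [PySem.List.enumerate_cons, List.foldl_cons,
      show (let level := ((PySem.Dict.mk (k, s).2).get? "motivation_level").getD ""
            if (PySem.Dict.mk [("High", h), ("Medium", m), ("Low", l)]).contains level
            then (PySem.Dict.mk [("High", h), ("Medium", m), ("Low", l)]).modify level [] (· ++ [(k, s).1])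
            else PySem.Dict.mk [("High", h), ("Medium", m), ("Low", l)])
          = _ from astep_eval h m l k s, ih]
    simp [pvIdxs]


theorem A_closed (ss : List (List (String × String))) (n : Int) (ts : List Int) :
    create_uniformity_first_solution ss n ts =
      pvW n (pvIdxs ss 0 "Low") 0 (pvW n (pvIdxs ss 0 "Medium") 0
        (pvW n (pvIdxs ss 0 "High") 0 (List.replicate ss.length 0))) := by
  simp only [create_uniformity_first_solution]
  rw [show PySem.Dict.ofList [("High", ([] : List Int)), ("Medium", []), ("Low", [])]
        = PySem.Dict.mk [("High", []), ("Medium", []), ("Low", [])] from rfl, mi_char]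
  simp only [List.foldl_cons, List.foldl_nil]
  simp [pvW_eq_foldl]

theorem pvCnt_cons (s : List (String × String)) (t : List (List (String × String))) (L : String) :
    pvCnt (s :: t) L = pvCnt t L + (if pvLvl s = L then 1 else 0) := by
  unfold pvCnt
  rw [List.countP_cons]
  by_cases h : pvLvl s = L <;> simp [h]

theorem pvIdxs_bound (ss : List (List (String × String))) (L : String) (sol : List Int)
    (hs : sol.length = ss.length) : ∀ i ∈ pvIdxs ss 0 L, 0 ≤ i ∧ i < (sol.length : Int) := by
  intro i hi
  have := pvIdxs_lt ss 0 L i hi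
  omega

theorem A_snoc (ss : List (List (String × String))) (s : List (String × String)) (n : Int) (ts : List Int) :
    create_uniformity_first_solution (ss ++ [s]) n ts
      = create_uniformity_first_solution ss n ts ++ [pvE s ss n] := by
  rw [A_closed, A_closed, pvIdxs_snoc, pvIdxs_snoc, pvIdxs_snoc]
  rw [show (ss ++ [s]).length = ss.length + 1 by simp, List.replicate_succ']
  have lR : (List.replicate ss.length (0 : Int)).length = ss.length := by simp
  have bndH := pvIdxs_bound ss "High" _ lR
  have lH : (pvW n (pvIdxs ss 0 "High") 0 (List.replicate ss.length (0 : Int))).length = ss.length := by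
    rw [length_pvW, lR]
  have bndM := pvIdxs_bound ss "Medium" _ lH
  have lM : (pvW n (pvIdxs ss 0 "Medium") 0 (pvW n (pvIdxs ss 0 "High") 0 (List.replicate ss.length (0 : Int)))).length = ss.length := by
    rw [length_pvW, lH]
  have bndL := pvIdxs_bound ss "Low" _ lM
  by_cases hH : pvLvl s = "High"
  · simp only [hH, String.reduceEq, reduceIte, List.append_nil, Int.zero_add]
    rw [pvW_snoc, pvW_append_right n _ _ _ _ bndH,
      show ((ss.length : Int)) = ((pvW n (pvIdxs ss 0 "High") 0 (List.replicate ss.length (0 : Int))).length : Int) by rw [lH],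
      pySetD_last, pvW_append_right n _ _ _ _ bndM, pvW_append_right n _ _ _ _ bndL]
    simp [pvE, hH, length_pvIdxs]
  · by_cases hM : pvLvl s = "Medium"
    · simp only [hM, String.reduceEq, reduceIte, List.append_nil, Int.zero_add]
      rw [pvW_append_right n _ _ _ _ bndH, pvW_snoc, pvW_append_right n _ _ _ _ bndM,
        show ((ss.length : Int)) = ((pvW n (pvIdxs ss 0 "Medium") 0 (pvW n (pvIdxs ss 0 "High") 0 (List.replicate ss.length (0 : Int)))).length : Int) by rw [lM],
        pySetD_last, pvW_append_right n _ _ _ _ bndL]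
      simp [pvE, hM, length_pvIdxs]
    · by_cases hL : pvLvl s = "Low"
      · have lL : (pvW n (pvIdxs ss 0 "Low") 0 (pvW n (pvIdxs ss 0 "Medium") 0 (pvW n (pvIdxs ss 0 "High") 0 (List.replicate ss.length (0 : Int))))).length = ss.length := by
          rw [length_pvW, lM]
        simp only [hL, String.reduceEq, reduceIte, List.append_nil, Int.zero_add]
        rw [pvW_append_right n _ _ _ _ bndH, pvW_append_right n _ _ _ _ bndM, pvW_snoc,
          pvW_append_right n _ _ _ _ bndL,
          show ((ss.length : Int)) = ((pvW n (pvIdxs ss 0 "Low") 0 (pvW n (pvIdxs ss 0 "Medium") 0 (pvW n (pvIdxs ss 0 "High") 0 (List.replicate ss.length (0 : Int))))).length : Int) by rw [lL],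
          pySetD_last]
        simp [pvE, hL, length_pvIdxs]
      · simp only [hH, hM, hL, if_false, List.append_nil]
        rw [pvW_append_right n _ _ _ _ bndH, pvW_append_right n _ _ _ _ bndM,
          pvW_append_right n _ _ _ _ bndL]
        simp [pvE, hH, hM, hL]

theorem bstep_eval (n h m l : Int) (sol : List Int) (s : List (String × String)) :
    pvBStep n (PySem.Dict.mk [("High", h), ("Medium", m), ("Low", l)], sol) s
    = (PySem.Dict.mk [("High", h + (if pvLvl s = "High" then 1 else 0)),
        ("Medium", m + (if pvLvl s = "Medium" then 1 else 0)),
        ("Low", l + (if pvLvl s = "Low" then 1 else 0))],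
       sol ++ [if pvLvl s = "High" then PySem.Int.mod h n
         else if pvLvl s = "Medium" then PySem.Int.mod m n
         else if pvLvl s = "Low" then PySem.Int.mod l n else 0]) := by
  show (match (PySem.Dict.mk [("High", h), ("Medium", m), ("Low", l)]).get? (pvLvl s) with
    | some c => ((PySem.Dict.mk [("High", h), ("Medium", m), ("Low", l)]).insert (pvLvl s) (c + 1),
        sol ++ [PySem.Int.mod c n])
    | none => (PySem.Dict.mk [("High", h), ("Medium", m), ("Low", l)], sol ++ [0])) = _
  by_cases hH : pvLvl s = "High"
  · simp [hH, PySem.Dict.get?, PySem.Dict.insert, PySem.Dict.contains]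
  · by_cases hM : pvLvl s = "Medium"
    · simp [hM, PySem.Dict.get?, PySem.Dict.insert, PySem.Dict.contains]
    · by_cases hL : pvLvl s = "Low"
      · simp [hL, PySem.Dict.get?, PySem.Dict.insert, PySem.Dict.contains]
      · simp [Ne.symm hH, Ne.symm hM, Ne.symm hL, hH, hM, hL, PySem.Dict.get?]

theorem c_char (ss : List (List (String × String))) (n h m l : Int) (sol : List Int) :
    (ss.foldl (pvBStep n) (PySem.Dict.mk [("High", h), ("Medium", m), ("Low", l)], sol)).1
    = PySem.Dict.mk [("High", h + pvCnt ss "High"), ("Medium", m + pvCnt ss "Medium"),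
        ("Low", l + pvCnt ss "Low")] := by
  induction ss generalizing h m l sol with
  | nil => simp [pvCnt]
  | cons s t ih =>
    rw [List.foldl_cons, bstep_eval, ih]
    simp only [pvCnt_cons]
    ring_nf

theorem B_snoc (ss : List (List (String × String))) (s : List (String × String)) (n : Int) (ts : List Int) :
    create_uniformity_first_solution_alt (ss ++ [s]) n ts
      = create_uniformity_first_solution_alt ss n ts ++ [pvE s ss n] := by
  simp only [create_uniformity_first_solution_alt]
  rw [show PySem.Dict.ofList [("High", (0 : Int)), ("Medium", 0), ("Low", 0)]
        = PySem.Dict.mk [("High", 0), ("Medium", 0), ("Low", 0)] from rfl]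
  rw [List.foldl_append, List.foldl_cons, List.foldl_nil]
  rw [show (List.foldl (pvBStep n) (PySem.Dict.mk [("High", 0), ("Medium", 0), ("Low", 0)], ([] : List Int)) ss)
      = ((List.foldl (pvBStep n) (PySem.Dict.mk [("High", 0), ("Medium", 0), ("Low", 0)], ([] : List Int)) ss).1,
         (List.foldl (pvBStep n) (PySem.Dict.mk [("High", 0), ("Medium", 0), ("Low", 0)], ([] : List Int)) ss).2) from rfl]
  rw [c_char, bstep_eval]
  by_cases hH : pvLvl s = "High"
  · simp [pvE, hH]
  · by_cases hM : pvLvl s = "Medium"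
    · simp [pvE, hM]
    · by_cases hL : pvLvl s = "Low"
      · simp [pvE, hL]
      · simp [pvE, hH, hM, hL]

theorem A_eq_B (ss : List (List (String × String))) (n : Int) (ts : List Int) :
    create_uniformity_first_solution ss n ts = create_uniformity_first_solution_alt ss n ts := by
  induction ss using List.reverseRecOn with
  | nil => rfl
  | append_singleton ss s ih => rw [A_snoc, B_snoc, ih]

-- ===== VERDICT (by name: the statement is the Claim_ definition above) =====
theorem create_uniformity_first_solution_spec : Claim_equal_create_uniformity_first_solution := by
  intro students n_groups target_sizes _ _
  unfold Spec_create_uniformity_first_solution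
  exact A_eq_B students n_groups target_sizes
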